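-- pv_equiv track=rewrite | github.com/zjezdzalka/net-bruteforce2 | faster.py | _strw2binl
-- ===== SOURCE A (Python) =====
-- def _strw2binl(s: str) -> list:
--     # Wide-char string to little-endian words & pad
--     nblk = ((len(s) + 4) >> 5) + 1
--     blks = [0] * (nblk * 16)
--     for i, ch in enumerate(s):
--         blks[i >> 1] |= ord(ch) << ((i % 2) * 16)
--     i = len(s)
--     blks[i >> 1] |= 0x80 << ((i % 2) * 16)
--     blks[nblk*16 - 2] = len(s) * 16
--     return blks
-- ===== SOURCE B (Python) =====
-- def _strw2binl(s: str) -> list: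
--     # Pairwise packing: the 0x80 terminator is just another 16-bit unit.
--     vals = [ord(c) for c in s]
--     vals.append(0x80)
--     nblk = ((len(s) + 4) >> 5) + 1
--     words = []
--     i = 0
--     while i + 1 < len(vals):
--         words.append(vals[i] | (vals[i + 1] << 16))
--         i += 2
--     if i < len(vals):
--         words.append(vals[i])
--     blks = words + [0] * (nblk * 16 - len(words))
--     blks[nblk * 16 - 2] = len(s) * 16
--     return blks
-- ===== Notes on version B (the rewrite author's own statement) =====
-- stated objective: alternative
-- what changed: B builds the 16-bit unit list (char codes plus the 0x80 terminator as just another unit), packs consecutive unit pairs into little-endian words in one pairwise pass, and appends the zero padding, instead of A's per-character indexed OR-update into a preallocated zero block.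
import Mathlib
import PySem

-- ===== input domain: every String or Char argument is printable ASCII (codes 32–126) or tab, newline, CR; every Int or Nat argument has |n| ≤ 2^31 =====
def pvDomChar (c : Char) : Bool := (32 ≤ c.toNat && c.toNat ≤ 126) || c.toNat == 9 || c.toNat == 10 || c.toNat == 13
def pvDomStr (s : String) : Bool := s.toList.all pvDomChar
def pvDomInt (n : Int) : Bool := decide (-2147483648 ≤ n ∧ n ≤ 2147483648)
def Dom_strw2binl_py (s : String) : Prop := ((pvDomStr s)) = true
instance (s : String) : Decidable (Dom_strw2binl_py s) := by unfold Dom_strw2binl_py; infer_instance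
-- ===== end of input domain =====

-- B packs the 16-bit units (chars plus the 0x80 terminator) pairwise into output
-- words instead of OR-updating an indexed slot per input character: a different
-- decomposition of the same MD4-style padding routine, same cost.

-- ===== PORT A =====
-- the 'for i, ch in enumerate(s)' loop: structural recursion over the chars with the running index i
def strw2binlLoopA (blks : List Int) (i : Nat) (cs : List Char) : List Int :=
  match cs with
  | [] => blks
  | ch :: rest =>
      strw2binlLoopA
        (blks.set (i >>> 1) (Int.lor (blks.getD (i >>> 1) 0) ((ch.toNat : Int) <<< ((i % 2) * 16))))
        (i + 1) rest

def strw2binl_py (s : String) : List Int :=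
  ((strw2binlLoopA (List.replicate (((s.length + 4) >>> 5 + 1) * 16) 0) 0 s.toList).set
      (s.length >>> 1)
      (Int.lor ((strw2binlLoopA (List.replicate (((s.length + 4) >>> 5 + 1) * 16) 0) 0 s.toList).getD
          (s.length >>> 1) 0) ((0x80 : Int) <<< ((s.length % 2) * 16)))).set
    (((s.length + 4) >>> 5 + 1) * 16 - 2) ((s.length : Int) * 16)

-- ===== PORT B =====
-- B's while-loop pairing of vals into words, two units at a time
def strw2binlPack2 (vs : List Int) : List Int :=
  match vs with
  | [] => []
  | [a] => [a]
  | a :: b :: rest => Int.lor a (b <<< (16 : Nat)) :: strw2binlPack2 rest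

def strw2binl_py_alt (s : String) : List Int :=
  ((strw2binlPack2 (s.toList.map (fun (c : Char) => (c.toNat : Int)) ++ [0x80])) ++
      List.replicate ((((s.length + 4) >>> 5 + 1) * 16) -
        (strw2binlPack2 (s.toList.map (fun (c : Char) => (c.toNat : Int)) ++ [0x80])).length) 0).set
    (((s.length + 4) >>> 5 + 1) * 16 - 2) ((s.length : Int) * 16)

-- ===== PRECONDITION & SPEC =====
def Spec_strw2binl_py (s : String) (out : List Int) : Prop := out = strw2binl_py_alt s
instance (s : String) (out : List Int) : Decidable (Spec_strw2binl_py s out) := by unfold Spec_strw2binl_py; infer_instance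

-- ===== CLAIM =====
def Claim_equal_strw2binl_py : Prop := ∀ (s : String), Dom_strw2binl_py s → Spec_strw2binl_py s (strw2binl_py s)

-- ===== LEMMAS AND PROOFS =====

-- value-level view of A's loop (char → its code, terminator = one more unit)
def loopV (blks : List Int) (i : Nat) (vs : List Int) : List Int :=
  match vs with
  | [] => blks
  | v :: rest =>
      loopV (blks.set (i >>> 1) (Int.lor (blks.getD (i >>> 1) 0) (v <<< ((i % 2) * 16)))) (i + 1) rest

lemma loopA_eq_loopV (cs : List Char) (blks : List Int) (i : Nat) :
    strw2binlLoopA blks i cs = loopV blks i (cs.map (fun c => (c.toNat : Int))) := by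
  induction cs generalizing blks i with
  | nil => rfl
  | cons c rest ih => simp [strw2binlLoopA, loopV, ih]

lemma loopV_append_one (vs : List Int) (blks : List Int) (i : Nat) (x : Int) :
    loopV blks i (vs ++ [x]) =
      (loopV blks i vs).set ((i + vs.length) >>> 1)
        (Int.lor ((loopV blks i vs).getD ((i + vs.length) >>> 1) 0)
          (x <<< (((i + vs.length) % 2) * 16))) := by
  induction vs generalizing blks i with
  | nil => simp [loopV]
  | cons v rest ih =>
      simp only [List.cons_append, loopV]
      rw [ih, List.length_cons,
        show i + (rest.length + 1) = i + 1 + rest.length from by omega]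

lemma int_zero_lor (a : Int) : Int.lor 0 a = a := by
  cases a <;> simp [Int.lor, Nat.ldiff]

lemma pack2_length (vs : List Int) : (strw2binlPack2 vs).length = (vs.length + 1) / 2 := by
  induction vs using strw2binlPack2.induct with
  | case1 => simp [strw2binlPack2]
  | case2 a => simp [strw2binlPack2]
  | case3 a b rest ih => simp [strw2binlPack2, ih]; omega

lemma two_mul_shiftRight_one (p : Nat) : (2 * p) >>> 1 = p := by
  simp [Nat.shiftRight_eq_div_pow]

lemma two_mul_succ_shiftRight_one (p : Nat) : (2 * p + 1) >>> 1 = p := by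
  simp [Nat.shiftRight_eq_div_pow]; omega

-- core: starting at an even index past a finished prefix, the loop packs pairwise
lemma loopV_core (vs pre : List Int) (m : Nat) (h : vs.length ≤ 2 * m) :
    loopV (pre ++ List.replicate m 0) (2 * pre.length) vs =
      pre ++ strw2binlPack2 vs ++ List.replicate (m - (vs.length + 1) / 2) 0 := by
  induction vs using strw2binlPack2.induct generalizing pre m with
  | case1 => simp [loopV, strw2binlPack2]
  | case2 a =>
      simp only [List.length_singleton] at h
      obtain ⟨m', rfl⟩ : ∃ m', m = m' + 1 := ⟨m - 1, by omega⟩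
      simp [loopV, strw2binlPack2, two_mul_shiftRight_one, Nat.mul_mod_right,
        List.getD, List.replicate_succ, int_zero_lor]
  | case3 a b rest ih =>
      simp only [List.length_cons] at h
      obtain ⟨m', rfl⟩ : ∃ m', m = m' + 1 := ⟨m - 1, by omega⟩
      have step : loopV (pre ++ List.replicate (m' + 1) 0) (2 * pre.length) (a :: b :: rest) =
          loopV ((pre ++ [Int.lor a (b <<< (16 : Nat))]) ++ List.replicate m' 0)
            (2 * (pre ++ [Int.lor a (b <<< (16 : Nat))]).length) rest := by
        simp [loopV, two_mul_shiftRight_one, two_mul_succ_shiftRight_one, Nat.mul_mod_right,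
          List.getD, List.replicate_succ, int_zero_lor]
        rw [show 2 * pre.length + 1 + 1 = 2 * (pre.length + 1) from by omega]
      rw [step, ih (pre ++ [Int.lor a (b <<< (16 : Nat))]) m' (by omega)]
      simp only [List.append_assoc, List.cons_append, List.nil_append, strw2binlPack2]
      rw [show m' - (rest.length + 1) / 2 = m' + 1 - (rest.length + 1 + 1 + 1) / 2 from by omega]
      simp

lemma nblk_bound (n : Nat) : n + 1 ≤ 2 * (((n + 4) >>> 5 + 1) * 16) := by
  have h : (n + 4) >>> 5 = (n + 4) / 32 := by
    simp [Nat.shiftRight_eq_div_pow]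
  omega

-- ===== VERDICT =====
theorem strw2binl_py_spec : Claim_equal_strw2binl_py := by
  intro s _
  unfold Spec_strw2binl_py strw2binl_py strw2binl_py_alt
  have hmap : (s.toList.map (fun c => (c.toNat : Int))).length = s.length := by simp
  have happ := loopV_append_one (s.toList.map (fun c => (c.toNat : Int)))
      (List.replicate (((s.length + 4) >>> 5 + 1) * 16) (0 : Int)) 0 (0x80 : Int)
  rw [hmap, Nat.zero_add] at happ
  rw [loopA_eq_loopV, ← happ]
  have hcore := loopV_core ((s.toList.map (fun c => (c.toNat : Int))) ++ [(0x80 : Int)])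
      [] (((s.length + 4) >>> 5 + 1) * 16)
      (by simpa [hmap] using nblk_bound s.length)
  simp only [List.nil_append, List.length_nil, Nat.mul_zero] at hcore
  rw [hcore, pack2_length]
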